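-- pv_equiv track=rewrite | github.com/robertfasano/argent | argent/generator.py | write_batch
-- ===== SOURCE A (Python) =====
-- def write_batch(events):
--     ''' Adds a batch of events into the generated code. The events argument
--         should be a list of generated events, e.g.
--             ['ttlA0.on()\n', 'ttlA1.off()\n']
--         This function concatenates these events into a larger sequence with
--         some special logic:
--         * If there is more than one event, events are written in a sequential block
--         * A small delay is inserted every 8 events to avoid sequence collisions
--     '''
--     if len(events) == 0:
--         return events[0]
--     code = 'with sequential:\n'
--     for i, event in enumerate(events):
--         if not i % 8 and i != 0:
--             code += '\tdelay(2*ns)\n'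
--         code += '\t' + event
--
--     return code
-- ===== SOURCE B (Python) =====
-- def write_batch(events):
--     if len(events) == 0:
--         return events[0]
--     chunks = [events[i:i + 8] for i in range(0, len(events), 8)]
--     blocks = [''.join('\t' + e for e in chunk) for chunk in chunks]
--     return 'with sequential:\n' + '\tdelay(2*ns)\n'.join(blocks)
-- ===== Notes on version B (the rewrite author's own statement) =====
-- stated objective: alternative
-- what changed: Replaces the single indexed pass with an 'i % 8 == 0 and i != 0' modulo test by a recursion on 8-element chunks, formatting each chunk and joining the blocks with the delay separator.
import Mathlib
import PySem

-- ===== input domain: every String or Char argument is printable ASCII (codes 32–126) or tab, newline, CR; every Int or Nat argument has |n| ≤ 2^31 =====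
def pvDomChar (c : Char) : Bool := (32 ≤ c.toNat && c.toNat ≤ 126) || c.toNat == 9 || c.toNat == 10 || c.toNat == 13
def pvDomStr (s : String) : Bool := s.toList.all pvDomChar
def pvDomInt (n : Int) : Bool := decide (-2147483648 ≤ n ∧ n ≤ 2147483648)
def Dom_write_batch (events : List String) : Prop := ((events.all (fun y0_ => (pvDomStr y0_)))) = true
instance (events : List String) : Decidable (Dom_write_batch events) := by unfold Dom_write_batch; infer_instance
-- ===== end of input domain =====

-- B replaces A's indexed single pass with its 'i % 8 == 0 and i != 0' modulo test by a
-- chunk decomposition: slice into 8-event chunks, format each block, join with the delay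
-- separator (objective: alternative decomposition).

-- ===== PORT A =====
-- literal port of A: guard, then an indexed fold with the 'i % 8 == 0 and i != 0' test
def write_batch (events : List String) : String :=
  if events.length = 0 then ""   -- unreachable under Pre_: Python raises IndexError here
  else
    (PySem.List.enumerate events 0).foldl
      (fun code ie =>
        (if PySem.Int.mod ie.1 8 == 0 && ie.1 != 0 then code ++ "\tdelay(2*ns)\n" else code)
          ++ "\t" ++ ie.2)
      "with sequential:\n"

-- ===== PORT B =====
-- literal port of Source B: slice into chunks of 8, format each chunk, join with the separator
def write_batch_alt (events : List String) : String :=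
  if events.length = 0 then ""   -- unreachable under Pre_: Python raises IndexError here
  else
    let chunks := (PySem.List.pyRange 0 (events.length : Int) 8).map
      (fun i => PySem.List.slice events (some i) (some (i + 8)))
    let blocks := chunks.map (fun c => PySem.Str.join "" (c.map (fun e => "\t" ++ e)))
    "with sequential:\n" ++ PySem.Str.join "\tdelay(2*ns)\n" blocks

-- ===== PRECONDITION & SPEC =====
-- Pre_ excludes only the empty list, on which A (and B alike) raise IndexError via 'events[0]'.
def Pre_write_batch (events : List String) : Prop := events ≠ []
instance (events : List String) : Decidable (Pre_write_batch events) := by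
  unfold Pre_write_batch; infer_instance
def pvWitness_write_batch : List String := ["ttlA0.on()\n", "ttlA1.off()\n"]

def Spec_write_batch (events : List String) (out : String) : Prop := out = write_batch_alt events
instance (events : List String) (out : String) : Decidable (Spec_write_batch events out) := by unfold Spec_write_batch; infer_instance

-- ===== CLAIM (what is proved, stated in full; the proofs are below) =====
def Claim_equal_write_batch : Prop := ∀ (events : List String), Dom_write_batch events → Pre_write_batch events → Spec_write_batch events (write_batch events)

-- ===== LEMMAS AND PROOFS =====

-- per-event contribution of A's loop body
def wb_h (ie : Int × String) : String :=
  (if PySem.Int.mod ie.1 8 == 0 && ie.1 != 0 then "\tdelay(2*ns)\n" else "") ++ "\t" ++ ie.2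

-- common middle form: B's chunk recursion, proof-side only
def wb_blocks (ev : List String) : String :=
  let head := String.join ((ev.take 8).map (fun e => "\t" ++ e))
  if _h : (ev.drop 8).isEmpty = true then head
  else head ++ "\tdelay(2*ns)\n" ++ wb_blocks (ev.drop 8)
termination_by ev.length
decreasing_by
  simp only [List.isEmpty_iff, List.drop_eq_nil_iff, not_le] at _h
  simp only [List.length_drop]
  omega

theorem wb_blocks_eq (l : List String) :
    wb_blocks l = if (l.drop 8).isEmpty then String.join ((l.take 8).map (fun e => "\t" ++ e))
      else String.join ((l.take 8).map (fun e => "\t" ++ e)) ++ "\tdelay(2*ns)\n" ++ wb_blocks (l.drop 8) := by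
  rw [wb_blocks]
  split <;> simp_all

theorem wb_foldl_str (l : List String) (acc : String) :
    l.foldl (fun a b => a ++ b) acc = acc ++ l.foldl (fun a b => a ++ b) "" := by
  induction l generalizing acc with
  | nil => simp
  | cons x xs ih =>
    rw [List.foldl_cons, List.foldl_cons, ih (acc ++ x), ih ("" ++ x)]
    simp [String.append_assoc]

theorem wb_join_cons (a : String) (l : List String) :
    String.join (a :: l) = a ++ String.join l := by
  show List.foldl (fun a b => a ++ b) "" (a :: l) = _
  rw [List.foldl_cons, wb_foldl_str]
  simp [String.join]

theorem wb_join_append (a b : List String) :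
    String.join (a ++ b) = String.join a ++ String.join b := by
  induction a with
  | nil => simp [String.join]
  | cons x xs ih => simp only [List.cons_append, wb_join_cons, ih, String.append_assoc]

theorem wb_step_eq (code : String) (ie : Int × String) :
    ((if PySem.Int.mod ie.1 8 == 0 && ie.1 != 0 then code ++ "\tdelay(2*ns)\n" else code)
      ++ "\t" ++ ie.2) = code ++ wb_h ie := by
  unfold wb_h
  split_ifs <;> simp [String.append_assoc]

theorem wb_foldl_acc (l : List (Int × String)) (acc : String) :
    l.foldl (fun code ie => code ++ wb_h ie) acc = acc ++ String.join (l.map wb_h) := by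
  induction l generalizing acc with
  | nil => simp [String.join]
  | cons x xs ih => rw [List.foldl_cons, ih, List.map_cons, wb_join_cons, String.append_assoc]

-- tail of a chunk: indices k+j … with 8 ∣ k, 1 ≤ j, j + c.length ≤ 8 never trigger the delay
theorem wb_join_tail (c : List String) (k : Nat) (hk : 8 ∣ k) : ∀ (j : Nat), 1 ≤ j →
    j + c.length ≤ 8 →
    String.join ((PySem.List.enumerate c ((k + j : Nat) : Int)).map wb_h)
      = String.join (c.map (fun e => "\t" ++ e)) := by
  induction c with
  | nil => intro j _ _; simp [PySem.List.enumerate_nil]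
  | cons e c ih =>
    intro j hj hlen
    rw [PySem.List.enumerate_cons]
    have hj8 : j < 8 := by simp at hlen; omega
    have hmod : PySem.Int.mod ((k + j : Nat) : Int) 8 = (j : Int) := by
      obtain ⟨m, rfl⟩ := hk
      simp only [PySem.Int.mod, Int.fmod_eq_emod]
      norm_num
      omega
    have hcond : (PySem.Int.mod ((k + j : Nat) : Int) 8 == 0 && ((k + j : Nat) : Int) != 0) = false := by
      rw [hmod]
      simp only [Bool.and_eq_false_iff, beq_eq_false_iff_ne, ne_eq]
      left
      exact_mod_cast (by omega : (j : Int) ≠ 0)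
    have htail : ((k + j : Nat) : Int) + 1 = ((k + (j + 1) : Nat) : Int) := by push_cast; ring
    rw [List.map_cons, wb_join_cons, htail, ih (j + 1) (by omega) (by simp at hlen ⊢; omega),
      List.map_cons, wb_join_cons]
    unfold wb_h
    rw [hcond]
    simp [String.append_assoc]

-- a whole chunk starting at index k (8 ∣ k): delay fires exactly at its head when k ≠ 0
theorem wb_join_chunk (c : List String) (k : Nat) (hk : 8 ∣ k) (hc : c ≠ [])
    (hlen : c.length ≤ 8) :
    String.join ((PySem.List.enumerate c (k : Int)).map wb_h)
      = (if k = 0 then "" else "\tdelay(2*ns)\n") ++ String.join (c.map (fun e => "\t" ++ e)) := by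
  cases c with
  | nil => exact absurd rfl hc
  | cons e c =>
    rw [PySem.List.enumerate_cons]
    have hmod : PySem.Int.mod (k : Int) 8 = 0 := by
      obtain ⟨m, rfl⟩ := hk
      simp only [PySem.Int.mod, Int.fmod_eq_emod]
      norm_num
    have h1 : ((k : Int) + 1) = ((k + 1 : Nat) : Int) := by push_cast; ring
    rw [List.map_cons, wb_join_cons, h1,
      wb_join_tail c k hk 1 le_rfl (by simp only [List.length_cons] at hlen; omega),
      List.map_cons, wb_join_cons]
    by_cases hk0 : k = 0
    · subst hk0
      simp [wb_h]
    · have hcondT : (PySem.Int.mod (k : Int) 8 == 0 && ((k : Int) != 0)) = true := by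
        rw [hmod]
        simp only [Bool.and_eq_true, beq_self_eq_true, bne_iff_ne, ne_eq, true_and]
        exact_mod_cast hk0
      rw [if_neg hk0]
      unfold wb_h
      rw [hcondT, if_pos rfl]
      simp [String.append_assoc]
      rw [show ("\tdelay(2*ns)\n\t" : String) = "\tdelay(2*ns)\n" ++ "\t" by decide, String.append_assoc]

-- A-side main invariant: the per-index contributions over a suffix starting at index k
-- equal the chunk recursion, with a leading delay iff k ≠ 0
theorem wb_main (n : Nat) : ∀ (l : List String) (k : Nat), l.length ≤ n → l ≠ [] → 8 ∣ k →
    String.join ((PySem.List.enumerate l (k : Int)).map wb_h)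
      = (if k = 0 then "" else "\tdelay(2*ns)\n") ++ wb_blocks l := by
  induction n with
  | zero => intro l k hl hne _; simp_all [List.length_eq_zero_iff]
  | succ n ih =>
    intro l k hl hne hk
    rw [wb_blocks_eq]
    by_cases hdrop : (l.drop 8).isEmpty
    · have hle : l.length ≤ 8 := by
        simpa [List.isEmpty_iff, List.drop_eq_nil_iff] using hdrop
      rw [if_pos hdrop, List.take_of_length_le hle]
      exact wb_join_chunk l k hk hne hle
    · have hlen : 8 < l.length := by
        simpa [List.isEmpty_iff, List.drop_eq_nil_iff, not_le] using hdrop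
      rw [if_neg hdrop]
      conv_lhs => rw [(List.take_append_drop 8 l).symm]
      rw [PySem.List.enumerate_append, List.map_append, wb_join_append]
      have htake : (l.take 8).length = 8 := by simp; omega
      have hkt : ((k : Int) + ((l.take 8).length : Nat)) = ((k + 8 : Nat) : Int) := by
        rw [htake]; push_cast; ring
      rw [hkt,
        ih (l.drop 8) (k + 8)
          (by simp only [List.length_drop]; omega)
          (by simpa [List.isEmpty_iff] using hdrop)
          (by omega),
        wb_join_chunk (l.take 8) k hk (by intro h; rw [h] at htake; simp at htake) (by rw [htake])]
      rw [if_neg (by omega : ¬ (k + 8 = 0))]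
      simp [String.append_assoc]

-- B-side bridges: PySem.Str.join facts
theorem wb_sjoin_cons (sep a : String) (l : List String) (h : l ≠ []) :
    PySem.Str.join sep (a :: l) = a ++ sep ++ PySem.Str.join sep l := by
  cases l with
  | nil => exact absurd rfl h
  | cons x xs => simp [PySem.Str.join, PySem.Chars.join_cons_cons, String.append_assoc]

theorem wb_sjoin_single (sep a : String) : PySem.Str.join sep [a] = a := by
  simp [PySem.Str.join, PySem.Chars.join_singleton]

theorem wb_sjoin_empty_eq_join (l : List String) :
    PySem.Str.join "" l = String.join l := by
  induction l with
  | nil => simp [PySem.Str.join, PySem.Chars.join_nil]; rfl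
  | cons x xs ih =>
    cases xs with
    | nil => rw [wb_sjoin_single]; rw [wb_join_cons]; simp [String.join]
    | cons y ys =>
      rw [wb_sjoin_cons _ _ _ (by simp), ih]
      simp [wb_join_cons]

-- range with step 8: induction forms
theorem wb_rng_nil (a b : Int) (h : b ≤ a) : PySem.List.pyRange a b 8 = [] := by
  rw [PySem.List.pyRange_of_pos _ _ (by norm_num : (0:Int) < 8)]
  rw [if_neg (by omega)]
  simp

theorem wb_rng_cons (a b : Int) (h : a < b) :
    PySem.List.pyRange a b 8 = a :: PySem.List.pyRange (a + 8) b 8 := by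
  rw [PySem.List.pyRange_of_pos _ _ (by norm_num : (0:Int) < 8),
      PySem.List.pyRange_of_pos _ _ (by norm_num : (0:Int) < 8)]
  have hc : ((b - a + 8 - 1) / 8).toNat
      = (if a + 8 < b then ((b - (a + 8) + 8 - 1) / 8).toNat else 0) + 1 := by
    split_ifs with h2 <;> omega
  rw [if_pos h, hc, List.range_succ_eq_map]
  simp only [List.map_cons, List.map_map, Nat.cast_zero, mul_zero, add_zero]
  congr 1
  apply List.map_congr_left
  intro k _
  simp only [Function.comp_apply]
  push_cast
  ring

theorem wb_rng_shift (a b : Int) :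
    PySem.List.pyRange (a + 8) b 8 = (PySem.List.pyRange a (b - 8) 8).map (· + 8) := by
  rw [PySem.List.pyRange_of_pos _ _ (by norm_num : (0:Int) < 8),
      PySem.List.pyRange_of_pos _ _ (by norm_num : (0:Int) < 8)]
  have hcond : (a + 8 < b) = (a < b - 8) := by
    apply propext
    omega
  have hc : (if a + 8 < b then ((b - (a + 8) + 8 - 1) / 8).toNat else 0)
      = (if a < b - 8 then ((b - 8 - a + 8 - 1) / 8).toNat else 0) := by
    split_ifs with h1 h2 <;> omega
  rw [hc, List.map_map]
  apply List.map_congr_left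
  intro k _
  simp only [Function.comp_apply]
  ring

-- a slice 8 further right is the same slice of the dropped list
theorem wb_slice_shift (l : List String) (jn : Nat) :
    PySem.List.slice l (some ((jn : Int) + 8)) (some ((jn : Int) + 8 + 8))
      = PySem.List.slice (l.drop 8) (some (jn : Int)) (some ((jn : Int) + 8)) := by
  have h1 : ((jn : Int) + 8) = ((jn + 8 : Nat) : Int) := by push_cast; ring
  have h2 : ((jn : Int) + 8 + 8) = ((jn + 16 : Nat) : Int) := by push_cast; ring
  have h3 : ((jn : Int) + 8) = ((jn : Int) + ((8 : Nat) : Int)) := by norm_num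
  rw [h2, h1, PySem.List.slice_natCast, PySem.List.slice_natCast, List.drop_drop]
  congr 1
  all_goals first | omega | (congr 1; omega)

-- B-side main invariant: the chunk/slice/join pipeline equals the chunk recursion
theorem wb_alt_main (n : Nat) : ∀ (l : List String), l.length ≤ n → l ≠ [] →
    PySem.Str.join "\tdelay(2*ns)\n"
      (((PySem.List.pyRange 0 (l.length : Int) 8).map
          (fun i => PySem.List.slice l (some i) (some (i + 8)))).map
        (fun c => PySem.Str.join "" (c.map (fun e => "\t" ++ e))))
      = wb_blocks l := by
  induction n with
  | zero => intro l hl hne; simp_all [List.length_eq_zero_iff]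
  | succ n ih =>
    intro l hl hne
    have hpos : (0 : Int) < (l.length : Int) := by
      have : l.length ≠ 0 := by simpa [List.length_eq_zero_iff] using hne
      omega
    rw [wb_rng_cons 0 (l.length : Int) hpos, wb_blocks_eq]
    have hhead : PySem.List.slice l (some (0 : Int)) (some ((0 : Int) + 8)) = l.take 8 := by
      have h0 : ((0 : Int) + 8) = ((8 : Nat) : Int) := by norm_num
      have h0' : (0 : Int) = ((0 : Nat) : Int) := by norm_num
      rw [h0, h0', PySem.List.slice_natCast]
      simp
    by_cases hdrop : (l.drop 8).isEmpty
    · have hle : l.length ≤ 8 := by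
        simpa [List.isEmpty_iff, List.drop_eq_nil_iff] using hdrop
      rw [if_pos hdrop, wb_rng_nil (0 + 8) (l.length : Int) (by omega)]
      simp only [List.map_cons, List.map_nil]
      rw [wb_sjoin_single, hhead, wb_sjoin_empty_eq_join]
    · have hlen : 8 < l.length := by
        simpa [List.isEmpty_iff, List.drop_eq_nil_iff, not_le] using hdrop
      rw [if_neg hdrop]
      -- rewrite the tail ranges as the pipeline over l.drop 8
      have htail : ((PySem.List.pyRange (0 + 8) (l.length : Int) 8).map
            (fun i => PySem.List.slice l (some i) (some (i + 8)))).map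
            (fun c => PySem.Str.join "" (c.map (fun e => "\t" ++ e)))
          = ((PySem.List.pyRange 0 ((l.drop 8).length : Int) 8).map
              (fun i => PySem.List.slice (l.drop 8) (some i) (some (i + 8)))).map
            (fun c => PySem.Str.join "" (c.map (fun e => "\t" ++ e))) := by
        have hlen8 : ((l.drop 8).length : Int) = (l.length : Int) - 8 := by
          simp only [List.length_drop]
          omega
        rw [hlen8, wb_rng_shift, List.map_map, List.map_map, List.map_map]
        apply List.map_congr_left
        intro j hj
        have hj0 : 0 ≤ j := by
          rcases (PySem.List.mem_pyRange_iff_of_pos (by norm_num : (0:Int) < 8) j).mp hj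
            with ⟨hj1, _, _⟩
          exact hj1
        obtain ⟨jn, rfl⟩ := Int.eq_ofNat_of_zero_le hj0
        simp only [Function.comp_apply]
        rw [wb_slice_shift]
      rw [List.map_cons, List.map_cons, htail]
      have hne' : l.drop 8 ≠ [] := by simpa [List.isEmpty_iff] using hdrop
      have hrest : ((PySem.List.pyRange 0 ((l.drop 8).length : Int) 8).map
            (fun i => PySem.List.slice (l.drop 8) (some i) (some (i + 8)))).map
            (fun c => PySem.Str.join "" (c.map (fun e => "\t" ++ e))) ≠ [] := by
        have hp : (0 : Int) < ((l.drop 8).length : Int) := by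
          simp only [List.length_drop]
          omega
        rw [wb_rng_cons 0 _ hp]
        simp
      rw [wb_sjoin_cons _ _ _ hrest,
        ih (l.drop 8) (by simp only [List.length_drop]; omega) hne',
        hhead, wb_sjoin_empty_eq_join]

-- ===== VERDICT (by name: the statement is the Claim_ definition above) =====
theorem write_batch_spec : Claim_equal_write_batch := by
  intro events _ hpre
  unfold Spec_write_batch write_batch write_batch_alt
  have hne : events.length ≠ 0 := by
    simpa [List.length_eq_zero_iff] using hpre
  rw [if_neg hne, if_neg hne]
  calc (PySem.List.enumerate events 0).foldl
        (fun code ie =>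
          (if PySem.Int.mod ie.1 8 == 0 && ie.1 != 0 then code ++ "\tdelay(2*ns)\n" else code)
            ++ "\t" ++ ie.2) "with sequential:\n"
      = (PySem.List.enumerate events 0).foldl (fun code ie => code ++ wb_h ie)
          "with sequential:\n" := by
        simp only [wb_step_eq]
    _ = "with sequential:\n" ++ String.join ((PySem.List.enumerate events 0).map wb_h) :=
        wb_foldl_acc _ _
    _ = "with sequential:\n" ++ wb_blocks events := by
        have := wb_main events.length events 0 le_rfl hpre (by omega)
        simp only [Nat.cast_zero] at this
        rw [this]
        simp
    _ = _ := by
        simp only [wb_alt_main events.length events le_rfl hpre]
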